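-- pv_equiv track=rewrite | github.com/ljw20180420/rearr | paper/utils/ARRANGE_RESULTS.py | coor2indel
-- ===== SOURCE A (Python) =====
-- def coor2indel(refcoor, seqcoor, cut1, cut2):
--     segs = []
--     for i in range(len(refcoor) - 1):
--         if refcoor[i + 1] > refcoor[i] and seqcoor[i + 1] > seqcoor[i]:
--             segs.append([refcoor[i], refcoor[i + 1], seqcoor[i], seqcoor[i + 1]])
--     indels = []
--     for i in range(len(segs) - 1):
--         indels.append(
--             [segs[i][1], segs[i + 1][0] - cut1 + cut2, segs[i][3], segs[i + 1][2]]
--         )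
--     if not indels:
--         seqpos = segs[0][2] + cut1 - segs[0][0]
--         indels.append([cut1, cut2, seqpos, seqpos])
--     return indels
-- ===== SOURCE B (Python) =====
-- def coor2indel(refcoor, seqcoor, cut1, cut2):
--     indels = []
--     first = None
--     prev = None
--     for a, b, c, d in zip(refcoor, refcoor[1:], seqcoor, seqcoor[1:]):
--         if b > a and d > c:
--             if prev is not None:
--                 indels.append([prev[1], a - cut1 + cut2, prev[3], c])
--             else:
--                 first = (a, c)
--             prev = (a, b, c, d)
--     if indels:
--         return indels
--     seqpos = first[1] + cut1 - first[0]
--     return [[cut1, cut2, seqpos, seqpos]]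
-- ===== Notes on version B (the rewrite author's own statement) =====
-- stated objective: alternative
-- what changed: One streaming pass over zip-ped adjacent quadruples that keeps only the previous segment and the first segment's two coordinates, emitting each indel as soon as the next segment appears, instead of materialising the full segs list and re-scanning it in a second indexed loop.
import Mathlib
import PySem

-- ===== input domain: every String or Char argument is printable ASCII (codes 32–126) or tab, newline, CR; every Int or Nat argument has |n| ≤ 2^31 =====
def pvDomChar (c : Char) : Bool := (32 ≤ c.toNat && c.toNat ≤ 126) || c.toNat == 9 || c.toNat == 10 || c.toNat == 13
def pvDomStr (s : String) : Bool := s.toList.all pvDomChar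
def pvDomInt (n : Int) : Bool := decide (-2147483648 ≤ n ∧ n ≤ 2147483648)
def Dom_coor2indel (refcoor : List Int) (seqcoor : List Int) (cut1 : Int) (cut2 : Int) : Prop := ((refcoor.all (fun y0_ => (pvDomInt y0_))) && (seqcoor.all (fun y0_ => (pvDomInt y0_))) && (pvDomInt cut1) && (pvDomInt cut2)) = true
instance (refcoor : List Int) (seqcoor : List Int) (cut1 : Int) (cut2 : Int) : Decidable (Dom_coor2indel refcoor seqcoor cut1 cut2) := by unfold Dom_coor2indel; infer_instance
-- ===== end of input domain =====

-- B replaces A's two passes (build the full segs list, then re-scan it by index) with one streaming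
-- pass over zipped adjacent quadruples that keeps only the previous segment and the first segment's
-- coordinates; return values agree on all of Pre_ (exactly the inputs where A returns).

-- ===== PORT A =====
-- first loop of A: build segs (indexing via pyGetD; Python raises where the index is out of range — excluded by Pre_)
def coor2indelSegs (refcoor : List Int) (seqcoor : List Int) : List (List Int) :=
  (PySem.List.pyRange 0 ((refcoor.length : Int) - 1) 1).foldl
    (fun segs i =>
      if PySem.List.pyGetD refcoor (i + 1) 0 > PySem.List.pyGetD refcoor i 0 ∧
         PySem.List.pyGetD seqcoor (i + 1) 0 > PySem.List.pyGetD seqcoor i 0 then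
        segs ++ [[PySem.List.pyGetD refcoor i 0, PySem.List.pyGetD refcoor (i + 1) 0,
                  PySem.List.pyGetD seqcoor i 0, PySem.List.pyGetD seqcoor (i + 1) 0]]
      else segs) []

-- second loop of A: indels between consecutive segs
def coor2indelIndels (cut1 : Int) (cut2 : Int) (segs : List (List Int)) : List (List Int) :=
  (PySem.List.pyRange 0 ((segs.length : Int) - 1) 1).foldl
    (fun indels i =>
      indels ++ [[PySem.List.pyGetD (PySem.List.pyGetD segs i []) 1 0,
                  PySem.List.pyGetD (PySem.List.pyGetD segs (i + 1) []) 0 0 - cut1 + cut2,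
                  PySem.List.pyGetD (PySem.List.pyGetD segs i []) 3 0,
                  PySem.List.pyGetD (PySem.List.pyGetD segs (i + 1) []) 2 0]]) []

def coor2indel (refcoor : List Int) (seqcoor : List Int) (cut1 : Int) (cut2 : Int) : List (List Int) :=
  let segs := coor2indelSegs refcoor seqcoor
  let indels := coor2indelIndels cut1 cut2 segs
  if indels = [] then
    let seqpos := PySem.List.pyGetD (PySem.List.pyGetD segs 0 []) 2 0 + cut1 -
                  PySem.List.pyGetD (PySem.List.pyGetD segs 0 []) 0 0
    indels ++ [[cut1, cut2, seqpos, seqpos]]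
  else indels

-- ===== PORT B =====
-- the single streaming loop of Source B: `for a, b, c, d in zip(refcoor, refcoor[1:], seqcoor, seqcoor[1:])`
-- (zip truncates to the common length, which the two-level pattern mirrors); state = (first, prev, indels)
def coor2indelAltLoop (cut1 : Int) (cut2 : Int) :
    List Int → List Int → Option (Int × Int) → Option (Int × Int × Int × Int) →
    List (List Int) → Option (Int × Int) × List (List Int)
  | a :: b :: rc, c :: d :: sc, first, prev, indels =>
      if b > a ∧ d > c then
        match prev with
        | some p =>
            coor2indelAltLoop cut1 cut2 (b :: rc) (d :: sc) first (some (a, b, c, d))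
              (indels ++ [[p.2.1, a - cut1 + cut2, p.2.2.2, c]])
        | none =>
            coor2indelAltLoop cut1 cut2 (b :: rc) (d :: sc) (some (a, c)) (some (a, b, c, d)) indels
      else coor2indelAltLoop cut1 cut2 (b :: rc) (d :: sc) first prev indels
  | _, _, first, _, indels => (first, indels)

def coor2indel_alt (refcoor : List Int) (seqcoor : List Int) (cut1 : Int) (cut2 : Int) : List (List Int) :=
  match coor2indelAltLoop cut1 cut2 refcoor seqcoor none none [] with
  | (first, indels) =>
    if indels ≠ [] then indels
    else
      match first with
      | some (a, c) => [[cut1, cut2, c + cut1 - a, c + cut1 - a]]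
      | none => []  -- Source B raises TypeError here (first is None); outside Pre_

-- ===== PRECONDITION & SPEC =====
-- Pre_ = exactly the inputs on which A returns: every refcoor-increasing adjacent index keeps the
-- matching seqcoor index in range (else A's `seqcoor[i+1]` raises IndexError), and at least one
-- adjacent pair increases in both lists (else `segs[0]` raises IndexError).
def Pre_coor2indel (refcoor : List Int) (seqcoor : List Int) (cut1 : Int) (cut2 : Int) : Prop :=
  (∀ i < refcoor.length - 1, refcoor.getD (i + 1) 0 > refcoor.getD i 0 → i + 1 < seqcoor.length) ∧
  (∃ i < refcoor.length - 1, i + 1 < seqcoor.length ∧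
    refcoor.getD (i + 1) 0 > refcoor.getD i 0 ∧ seqcoor.getD (i + 1) 0 > seqcoor.getD i 0)
instance (refcoor : List Int) (seqcoor : List Int) (cut1 : Int) (cut2 : Int) : Decidable (Pre_coor2indel refcoor seqcoor cut1 cut2) := by unfold Pre_coor2indel; infer_instance

def pvWitness_coor2indel : List Int × List Int × Int × Int := ([0, 2, 5], [1, 3, 4], 1, 2)

def Spec_coor2indel (refcoor : List Int) (seqcoor : List Int) (cut1 : Int) (cut2 : Int) (out : List (List Int)) : Prop := out = coor2indel_alt refcoor seqcoor cut1 cut2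
instance (refcoor : List Int) (seqcoor : List Int) (cut1 : Int) (cut2 : Int) (out : List (List Int)) : Decidable (Spec_coor2indel refcoor seqcoor cut1 cut2 out) := by unfold Spec_coor2indel; infer_instance

-- ===== CLAIM (what is proved, stated in full; the proofs are below) =====
def Claim_equal_coor2indel : Prop := ∀ (refcoor : List Int) (seqcoor : List Int) (cut1 : Int) (cut2 : Int), Dom_coor2indel refcoor seqcoor cut1 cut2 → Pre_coor2indel refcoor seqcoor cut1 cut2 → Spec_coor2indel refcoor seqcoor cut1 cut2 (coor2indel refcoor seqcoor cut1 cut2)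

-- ===== LEMMAS AND PROOFS =====

-- the segment list, structurally (the mathematical object both ports compute)
def segsOf : List Int → List Int → List (List Int)
  | a :: b :: rc, c :: d :: sc =>
      (if b > a ∧ d > c then [[a, b, c, d]] else []) ++ segsOf (b :: rc) (d :: sc)
  | _, _ => []

-- adjacent-pair indels of a segment list, structurally
def adjOf (cut1 cut2 : Int) : List (List Int) → List (List Int)
  | x :: y :: t =>
      [x.getD 1 0, y.getD 0 0 - cut1 + cut2, x.getD 3 0, y.getD 2 0] :: adjOf cut1 cut2 (y :: t)
  | _ => []

def segHead : List (List Int) → Option (Int × Int)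
  | s0 :: _ => some (s0.getD 0 0, s0.getD 2 0)
  | [] => none

theorem segs_range (rc : List Int) :
    ∀ (sc : List Int),
      (∀ i, i + 1 < rc.length → rc.getD (i + 1) 0 > rc.getD i 0 → i + 1 < sc.length) →
      (List.range (rc.length - 1)).flatMap
        (fun k => if rc.getD (k + 1) 0 > rc.getD k 0 ∧ sc.getD (k + 1) 0 > sc.getD k 0 then
            [[rc.getD k 0, rc.getD (k + 1) 0, sc.getD k 0, sc.getD (k + 1) 0]] else [])
        = segsOf rc sc := by
  induction rc with
  | nil => intro sc _; simp [segsOf]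
  | cons a rc' ih =>
    intro sc hG
    cases rc' with
    | nil => simp [segsOf]
    | cons b rc'' =>
      have hshort : sc.length ≤ 1 →
          (List.range ((a :: b :: rc'').length - 1)).flatMap
            (fun k => if (a :: b :: rc'').getD (k + 1) 0 > (a :: b :: rc'').getD k 0 ∧
                sc.getD (k + 1) 0 > sc.getD k 0 then
                [[(a :: b :: rc'').getD k 0, (a :: b :: rc'').getD (k + 1) 0,
                  sc.getD k 0, sc.getD (k + 1) 0]] else []) = [] := by
        intro hlen
        refine List.flatMap_eq_nil_iff.mpr ?_
        intro k hk
        rw [if_neg]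
        rintro ⟨hrc, _⟩
        have hb : k + 1 < (a :: b :: rc'').length := by
          have := List.mem_range.mp hk; simp at this ⊢; omega
        have := hG k hb hrc
        omega
      cases sc with
      | nil => rw [hshort (by simp)]; simp [segsOf]
      | cons c sc' =>
        cases sc' with
        | nil => rw [hshort (by simp)]; simp [segsOf]
        | cons d sc'' =>
          have hG' : ∀ i, i + 1 < (b :: rc'').length →
              (b :: rc'').getD (i + 1) 0 > (b :: rc'').getD i 0 → i + 1 < (d :: sc'').length := by
            intro i hlen hinc
            have := hG (i + 1) (by simp at hlen ⊢; omega) (by simpa using hinc)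
            simp at this ⊢; omega
          have hIH := ih (d :: sc'') hG'
          have hlen : (a :: b :: rc'').length - 1 = ((b :: rc'').length - 1) + 1 := by simp
          rw [hlen, List.range_succ_eq_map, List.flatMap_cons, List.flatMap_map]
          have hfun : (fun k => if (a :: b :: rc'').getD (k.succ + 1) 0 > (a :: b :: rc'').getD k.succ 0 ∧
                (c :: d :: sc'').getD (k.succ + 1) 0 > (c :: d :: sc'').getD k.succ 0 then
                [[(a :: b :: rc'').getD k.succ 0, (a :: b :: rc'').getD (k.succ + 1) 0,
                  (c :: d :: sc'').getD k.succ 0, (c :: d :: sc'').getD (k.succ + 1) 0]] else [])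
              = (fun k => if (b :: rc'').getD (k + 1) 0 > (b :: rc'').getD k 0 ∧
                (d :: sc'').getD (k + 1) 0 > (d :: sc'').getD k 0 then
                [[(b :: rc'').getD k 0, (b :: rc'').getD (k + 1) 0,
                  (d :: sc'').getD k 0, (d :: sc'').getD (k + 1) 0]] else []) := by
            funext k
            simp [Nat.succ_eq_add_one, List.getD_cons_succ]
          simp only [Function.comp] at *
          rw [hfun, hIH]
          simp [segsOf, List.getD_cons_succ, List.getD_cons_zero]

theorem adj_range (cut1 cut2 : Int) (l : List (List Int)) :
    (List.range (l.length - 1)).map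
      (fun k => [(l.getD k []).getD 1 0, (l.getD (k + 1) []).getD 0 0 - cut1 + cut2,
                 (l.getD k []).getD 3 0, (l.getD (k + 1) []).getD 2 0])
      = adjOf cut1 cut2 l := by
  induction l with
  | nil => simp [adjOf]
  | cons x l' ih =>
    cases l' with
    | nil => simp [adjOf]
    | cons y t =>
      have hlen : (x :: y :: t).length - 1 = ((y :: t).length - 1) + 1 := by simp
      rw [hlen, List.range_succ_eq_map, List.map_cons, List.map_map]
      have hfun : ((fun k => [((x :: y :: t).getD k []).getD 1 0,
            ((x :: y :: t).getD (k + 1) []).getD 0 0 - cut1 + cut2,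
            ((x :: y :: t).getD k []).getD 3 0,
            ((x :: y :: t).getD (k + 1) []).getD 2 0]) ∘ Nat.succ)
          = (fun k => [((y :: t).getD k []).getD 1 0,
            ((y :: t).getD (k + 1) []).getD 0 0 - cut1 + cut2,
            ((y :: t).getD k []).getD 3 0,
            ((y :: t).getD (k + 1) []).getD 2 0]) := by
        funext k
        simp [Function.comp, Nat.succ_eq_add_one, List.getD_cons_succ]
      rw [hfun, ih]
      simp [adjOf, List.getD_cons_succ, List.getD_cons_zero]

theorem segsA_eq (rc sc : List Int)
    (hG : ∀ i, i + 1 < rc.length → rc.getD (i + 1) 0 > rc.getD i 0 → i + 1 < sc.length) :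
    coor2indelSegs rc sc = segsOf rc sc := by
  unfold coor2indelSegs
  have hcongr := PySem.List.foldl_congr_mem
      (l := PySem.List.pyRange 0 ((rc.length : Int) - 1) 1)
      (init := ([] : List (List Int)))
      (f := fun segs i => if PySem.List.pyGetD rc (i + 1) 0 > PySem.List.pyGetD rc i 0 ∧
          PySem.List.pyGetD sc (i + 1) 0 > PySem.List.pyGetD sc i 0 then
          segs ++ [[PySem.List.pyGetD rc i 0, PySem.List.pyGetD rc (i + 1) 0,
            PySem.List.pyGetD sc i 0, PySem.List.pyGetD sc (i + 1) 0]] else segs)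
      (g := fun segs i => segs ++ (if PySem.List.pyGetD rc (i + 1) 0 > PySem.List.pyGetD rc i 0 ∧
          PySem.List.pyGetD sc (i + 1) 0 > PySem.List.pyGetD sc i 0 then
          [[PySem.List.pyGetD rc i 0, PySem.List.pyGetD rc (i + 1) 0,
            PySem.List.pyGetD sc i 0, PySem.List.pyGetD sc (i + 1) 0]] else []))
      (by intro acc x _; dsimp only; split <;> simp)
  rw [hcongr]
  rw [PySem.List.foldl_append_eq_flatMap, PySem.List.pyRange_one, List.flatMap_map]
  have hn : (((rc.length : Int) - 1) - 0).toNat = rc.length - 1 := by omega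
  rw [hn]
  have hfun : (fun (k : Nat) => if PySem.List.pyGetD rc ((0 + (k : Int)) + 1) 0 > PySem.List.pyGetD rc (0 + (k : Int)) 0 ∧
        PySem.List.pyGetD sc ((0 + (k : Int)) + 1) 0 > PySem.List.pyGetD sc (0 + (k : Int)) 0 then
        [[PySem.List.pyGetD rc (0 + (k : Int)) 0, PySem.List.pyGetD rc ((0 + (k : Int)) + 1) 0,
          PySem.List.pyGetD sc (0 + (k : Int)) 0, PySem.List.pyGetD sc ((0 + (k : Int)) + 1) 0]] else [])
      = (fun k => if rc.getD (k + 1) 0 > rc.getD k 0 ∧ sc.getD (k + 1) 0 > sc.getD k 0 then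
          [[rc.getD k 0, rc.getD (k + 1) 0, sc.getD k 0, sc.getD (k + 1) 0]] else []) := by
    funext k
    have h1 : (0 : Int) + (k : Int) = ((k : Nat) : Int) := by omega
    have h2 : ((k : Nat) : Int) + 1 = (((k + 1 : Nat)) : Int) := by push_cast; ring
    rw [h1, h2]
    simp only [PySem.List.pyGetD_natCast]
  simp only [Function.comp] at *
  rw [List.nil_append] at *
  rw [hfun]
  exact segs_range rc sc hG

theorem indelsA_eq (cut1 cut2 : Int) (l : List (List Int)) :
    coor2indelIndels cut1 cut2 l = adjOf cut1 cut2 l := by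
  unfold coor2indelIndels
  rw [PySem.List.foldl_append_singleton_eq_map, PySem.List.pyRange_one, List.map_map]
  have hn : (((l.length : Int) - 1) - 0).toNat = l.length - 1 := by omega
  rw [hn]
  have hfun : ((fun (i : Int) => [PySem.List.pyGetD (PySem.List.pyGetD l i []) 1 0,
        PySem.List.pyGetD (PySem.List.pyGetD l (i + 1) []) 0 0 - cut1 + cut2,
        PySem.List.pyGetD (PySem.List.pyGetD l i []) 3 0,
        PySem.List.pyGetD (PySem.List.pyGetD l (i + 1) []) 2 0]) ∘ (fun (k : Nat) => (0 : Int) + (k : Int)))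
      = (fun k => [(l.getD k []).getD 1 0, (l.getD (k + 1) []).getD 0 0 - cut1 + cut2,
                   (l.getD k []).getD 3 0, (l.getD (k + 1) []).getD 2 0]) := by
    funext k
    have h1 : (0 : Int) + (k : Int) = ((k : Nat) : Int) := by omega
    have h2 : ((k : Nat) : Int) + 1 = (((k + 1 : Nat)) : Int) := by push_cast; ring
    simp only [Function.comp]
    rw [h1, h2]
    simp only [PySem.List.pyGetD_natCast, PySem.List.pyGetD_ofNat']
  rw [List.nil_append, hfun]
  exact adj_range cut1 cut2 l

theorem altLoop_eq (cut1 cut2 : Int) (rc : List Int) :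
    ∀ (sc : List Int) (first : Option (Int × Int)) (prev : Option (Int × Int × Int × Int))
      (indels : List (List Int)),
      coor2indelAltLoop cut1 cut2 rc sc first prev indels =
        match prev with
        | none => (if segsOf rc sc = [] then first else segHead (segsOf rc sc),
                   indels ++ adjOf cut1 cut2 (segsOf rc sc))
        | some p => (first, indels ++ adjOf cut1 cut2 ([p.1, p.2.1, p.2.2.1, p.2.2.2] :: segsOf rc sc)) := by
  induction rc with
  | nil =>
    intro sc first prev indels
    cases prev <;> simp [coor2indelAltLoop, segsOf, adjOf]
  | cons a rc' ih =>
    intro sc first prev indels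
    cases rc' with
    | nil => cases prev <;> simp [coor2indelAltLoop, segsOf, adjOf]
    | cons b rc'' =>
      cases sc with
      | nil => cases prev <;> simp [coor2indelAltLoop, segsOf, adjOf]
      | cons c sc' =>
        cases sc' with
        | nil => cases prev <;> simp [coor2indelAltLoop, segsOf, adjOf]
        | cons d sc'' =>
          by_cases hg : b > a ∧ d > c
          · cases prev with
            | none =>
              simp only [coor2indelAltLoop, if_pos hg]
              rw [ih]
              simp [segsOf, if_pos hg, segHead, adjOf, List.getD]
            | some p =>
              simp only [coor2indelAltLoop, if_pos hg]
              rw [ih]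
              simp [segsOf, if_pos hg, segHead, adjOf, List.getD]
          · cases prev with
            | none =>
              simp only [coor2indelAltLoop, if_neg hg]
              rw [ih]
              simp [segsOf, if_neg hg]
            | some p =>
              simp only [coor2indelAltLoop, if_neg hg]
              rw [ih]
              simp [segsOf, if_neg hg]

theorem segsOf_ne_nil (i : Nat) :
    ∀ (rc sc : List Int), i + 1 < rc.length → i + 1 < sc.length →
      rc.getD (i + 1) 0 > rc.getD i 0 → sc.getD (i + 1) 0 > sc.getD i 0 →
      segsOf rc sc ≠ [] := by
  induction i with
  | zero =>
    intro rc sc hr hs h1 h2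
    match rc, sc, hr, hs with
    | a :: b :: rc'', c :: d :: sc'', _, _ =>
      simp [List.getD_cons_succ, List.getD_cons_zero] at h1 h2
      simp [segsOf, if_pos (And.intro h1 h2)]
  | succ i ih =>
    intro rc sc hr hs h1 h2
    match rc, sc, hr, hs with
    | a :: b :: rc'', c :: d :: sc'', hr, hs =>
      have : segsOf (b :: rc'') (d :: sc'') ≠ [] := by
        refine ih (b :: rc'') (d :: sc'') ?_ ?_ ?_ ?_
        · simp at hr ⊢; omega
        · simp at hs ⊢; omega
        · simpa [List.getD_cons_succ] using h1
        · simpa [List.getD_cons_succ] using h2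
      simp only [segsOf]
      intro h
      rcases List.append_eq_nil_iff.mp h with ⟨_, h2'⟩
      exact this h2'

-- ===== VERDICT (by name: the statement is the Claim_ definition above) =====
theorem coor2indel_spec : Claim_equal_coor2indel := by
  intro rc sc cut1 cut2 _ hPre
  unfold Spec_coor2indel
  obtain ⟨hG, i, hi, hisc, h1, h2⟩ := hPre
  have hG' : ∀ j, j + 1 < rc.length → rc.getD (j + 1) 0 > rc.getD j 0 → j + 1 < sc.length :=
    fun j hj => hG j (by omega)
  have hsegs : coor2indelSegs rc sc = segsOf rc sc := segsA_eq rc sc hG'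
  have hne : segsOf rc sc ≠ [] := segsOf_ne_nil i rc sc (by omega) hisc h1 h2
  obtain ⟨s0, t, hs⟩ : ∃ s0 t, segsOf rc sc = s0 :: t := by
    cases h : segsOf rc sc with
    | nil => exact absurd h hne
    | cons s0 t => exact ⟨s0, t, rfl⟩
  unfold coor2indel coor2indel_alt
  rw [altLoop_eq]
  simp only [hsegs, hs, indelsA_eq]
  cases hadj : adjOf cut1 cut2 (s0 :: t) with
  | nil =>
    simp [segHead, hadj, PySem.List.pyGetD_zero_cons, PySem.List.pyGetD_ofNat']
  | cons u v =>
    simp [segHead, hadj]
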